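-- pv_equiv track=rewrite | github.com/LaraEmanuele/Algoritmo-da-mochila-booleana | SolucaoGulosa.py | gulosoMenorPeso
-- ===== SOURCE A (Python) =====
-- import copy
--
-- def gulosoMenorPeso (listaOriginal):
--     lista = copy.deepcopy(listaOriginal)
--     qtdItens = lista[0][0] #Constante que indica o número de itens na mochila
--     w = lista[0][1]#Constante que indica capacidade máxima na mochila
--     aux = [1001, 1001, 1001]
--     capacidadeRestante = w
--     beneficio = 0
--     limite = 0 # Se 1 não a itens para inserir com a capacidade restante
--     listaResult = []
--
--     while w != 0 and qtdItens > -1 and limite != 1: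
--         for i in range (1, len(lista)):
--             if capacidadeRestante >= lista[i][1] and lista[i][1] < aux[1]:
--                 aux = [lista[i][0], lista[i][1], i]
--             elif capacidadeRestante >= lista[i][1] and lista[i][1] == aux[1]:
--                 if lista[i][0] > aux[0]:
--                     aux = [lista[i][0], lista[i][1], i]
--         if aux != [1001, 1001, 1001]:
--             listaResult.append(aux)
--             beneficio = beneficio + aux[0]
--             capacidadeRestante = capacidadeRestante - aux[1]
--             del lista [aux[2]]
--             aux = [1001, 1001, 1001]
--         else:
--             limite = 1
--
--     return listaResult, beneficio
-- ===== SOURCE B (Python) =====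
-- def gulosoMenorPeso(listaOriginal):
--     # Sort the data rows once by (weight asc, benefit desc, position asc), then take
--     # items in that order while they still fit; the index each pick would have had in
--     # A's shrinking list is its original position minus the earlier-taken positions
--     # below it.
--     qtdItens = listaOriginal[0][0]
--     w = listaOriginal[0][1]
--     if w == 0 or qtdItens <= -1:
--         return [], 0
--     items = sorted(
--         ((j, row[0], row[1]) for j, row in enumerate(listaOriginal) if j >= 1),
--         key=lambda t: (t[2], -t[1], t[0]),
--     )
--     listaResult = []
--     beneficio = 0
--     cap = w
--     taken = []
--     for j, b, p in items:
--         if cap < p: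
--             break
--         dyn = j - sum(1 for t in taken if t < j)
--         listaResult.append([b, p, dyn])
--         beneficio += b
--         cap -= p
--         taken.append(j)
--     return listaResult, beneficio
-- ===== Notes on version B (the rewrite author's own statement) =====
-- stated objective: alternative
-- what changed: A rescans the whole remaining list once per picked item and deletes the minimum in place; B sorts the data rows once by (weight asc, benefit desc, position asc) and takes a single sweep over the sorted list while items still fit, reconstructing A's shrinking-list indices by counting earlier-taken positions below each pick.
-- intended difference: On inputs where the greedy sweep reaches a still-fitting item of weight > 1001 (or weight exactly 1001 with benefit <= 1001), A's sentinel initialisation [1001,1001,1001] makes it stop and silently drop every remaining item while B keeps taking items that fit; B's value is the intended greedy result since 1001 is only an arbitrary 'infinity' placeholder. — e.g. on gulosoMenorPeso([[1, 1001], [5, 1001]]): A returns ([], 0), B returns ([[5, 1001, 1]], 5)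
import Mathlib
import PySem

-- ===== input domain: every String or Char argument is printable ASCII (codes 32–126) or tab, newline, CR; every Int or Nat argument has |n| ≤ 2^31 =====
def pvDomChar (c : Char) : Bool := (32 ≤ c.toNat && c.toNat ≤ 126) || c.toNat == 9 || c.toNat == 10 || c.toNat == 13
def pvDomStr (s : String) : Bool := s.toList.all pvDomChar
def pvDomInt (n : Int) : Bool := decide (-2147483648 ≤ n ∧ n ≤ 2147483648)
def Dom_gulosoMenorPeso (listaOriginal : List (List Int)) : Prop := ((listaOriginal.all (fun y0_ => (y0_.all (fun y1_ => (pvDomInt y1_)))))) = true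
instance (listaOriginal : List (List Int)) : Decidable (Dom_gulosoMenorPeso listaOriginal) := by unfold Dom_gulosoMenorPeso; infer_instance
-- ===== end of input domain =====

-- B replaces A's quadratic rescan-and-delete greedy by one stable sort by (weight asc,
-- benefit desc, position asc) plus a single sweep that takes items while they fit
-- (objective: alternative algorithm); on inputs where a fitting item collides with A's
-- 1001 sentinel the two differ by intention (see D_gulosoMenorPeso below).

-- ===== PORT A =====
-- inner 'for i in range(1, len(lista))' body of A's while loop
def pvAuxStep (lista : List (List Int)) (cap : Int) (aux : List Int) (i : Int) : List Int :=
  let ri0 := PySem.List.pyGetD (PySem.List.pyGetD lista i []) 0 0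
  let ri1 := PySem.List.pyGetD (PySem.List.pyGetD lista i []) 1 0
  if cap ≥ ri1 ∧ ri1 < PySem.List.pyGetD aux 1 0 then [ri0, ri1, i]
  else if cap ≥ ri1 ∧ ri1 = PySem.List.pyGetD aux 1 0 then
    (if ri0 > PySem.List.pyGetD aux 0 0 then [ri0, ri1, i] else aux)
  else aux

-- one full 'for' pass computing aux, starting from the sentinel [1001, 1001, 1001]
def pvAuxScan (lista : List (List Int)) (cap : Int) : List Int :=
  (PySem.List.pyRange 1 (lista.length : Int) 1).foldl (pvAuxStep lista cap) [1001, 1001, 1001]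

-- A's while loop; fuel = initial len(lista)+1 bounds the iteration count (each pick
-- deletes one row, plus one final pass that sets limite), it never runs out inside Pre_.
def pvLoopA (w qtd : Int) : Nat → List (List Int) → Int → Int → List (List Int) → List (List Int) × Int
  | 0, _, _, ben, res => (res, ben)
  | fuel + 1, lista, cap, ben, res =>
    if w ≠ 0 ∧ qtd > -1 then
      let aux := pvAuxScan lista cap
      if aux ≠ [1001, 1001, 1001] then
        pvLoopA w qtd fuel (lista.eraseIdx (PySem.List.pyGetD aux 2 0).toNat)
          (cap - PySem.List.pyGetD aux 1 0) (ben + PySem.List.pyGetD aux 0 0) (res ++ [aux])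
      else (res, ben)
    else (res, ben)

def gulosoMenorPeso (listaOriginal : List (List Int)) : List (List Int) × Int :=
  let qtdItens := PySem.List.pyGetD (PySem.List.pyGetD listaOriginal 0 []) 0 0
  let w := PySem.List.pyGetD (PySem.List.pyGetD listaOriginal 0 []) 1 0
  pvLoopA w qtdItens (listaOriginal.length + 1) listaOriginal w 0 []

-- ===== PORT B =====
-- (position j, benefit, weight) triples of the data rows, j ≥ 1
def pvItems (l : List (List Int)) : List (Int × Int × Int) :=
  ((PySem.List.enumerate l 0).filter (fun t => decide (1 ≤ t.1))).map
    (fun t => (t.1, PySem.List.pyGetD t.2 0 0, PySem.List.pyGetD t.2 1 0))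

-- Source B's sort key (t[2], -t[1], t[0]), compared lexicographically as in Python
def pvKey (t : Int × Int × Int) : Int ×ₗ Int ×ₗ Int := toLex (t.2.2, toLex (-t.2.1, t.1))

-- Source B's 'for j, b, p in items' sweep with break
def pvSweep : List (Int × Int × Int) → Int → Int → List Int → List (List Int) → List (List Int) × Int
  | [], _, ben, _, res => (res, ben)
  | (j, b, p) :: rest, cap, ben, taken, res =>
    if cap < p then (res, ben)
    else
      let dyn := j - taken.foldl (fun acc t => if t < j then acc + 1 else acc) 0
      pvSweep rest (cap - p) (ben + b) (taken ++ [j]) (res ++ [[b, p, dyn]])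

def gulosoMenorPeso_alt (listaOriginal : List (List Int)) : List (List Int) × Int :=
  let qtdItens := PySem.List.pyGetD (PySem.List.pyGetD listaOriginal 0 []) 0 0
  let w := PySem.List.pyGetD (PySem.List.pyGetD listaOriginal 0 []) 1 0
  if w = 0 ∨ qtdItens ≤ -1 then ([], 0)
  else pvSweep (PySem.List.sorted (pvItems listaOriginal) pvKey) w 0 [] []

-- ===== PRECONDITION & SPEC =====
-- Pre_ excludes exactly the inputs where Python A raises IndexError: an empty list, a
-- header row shorter than 2, or (only when the loop is entered, i.e. w ≠ 0 and
-- qtdItens > -1, since otherwise no data row is ever read) a data row shorter than 2.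
def Pre_gulosoMenorPeso (listaOriginal : List (List Int)) : Prop :=
  listaOriginal ≠ [] ∧ 2 ≤ (listaOriginal.headD []).length ∧
    (((listaOriginal.headD []).getD 1 0 ≠ 0 ∧ (listaOriginal.headD []).getD 0 0 > -1) →
      ∀ r ∈ listaOriginal.tail, 2 ≤ r.length)
instance (listaOriginal : List (List Int)) : Decidable (Pre_gulosoMenorPeso listaOriginal) := by
  unfold Pre_gulosoMenorPeso; infer_instance
def pvWitness_gulosoMenorPeso : List (List Int) := [[2, 10], [3, 4], [5, 6]]

-- D_-side reading of the input, independent of the ports: each data row as a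
-- (benefit, weight) pair, in order
def pvDItems (l : List (List Int)) : List (Int × Int) :=
  l.tail.map (fun r => (r.getD 0 0, r.getD 1 0))

-- does the greedy sweep over the rows in (weight asc, benefit desc) order reach a
-- still-fitting row that A's 1001 sentinel refuses?
def pvReachFail : Int → List (Int × Int) → Bool
  | _, [] => false
  | cap, (b, p) :: rest =>
    if cap < p then false
    else if 1001 < p ∨ (p = 1001 ∧ b ≤ 1001) then true
    else pvReachFail (cap - p) rest

-- On inputs where the greedy sweep reaches a still-fitting item of weight > 1001, or of
-- weight exactly 1001 with benefit ≤ 1001, A's sentinel initialisation [1001,1001,1001]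
-- makes it stop and silently drop every remaining item, while B keeps taking items that
-- fit; B's value is the intended greedy result, the sentinel is an arbitrary 'infinity'.
def D_gulosoMenorPeso (listaOriginal : List (List Int)) : Prop :=
  (listaOriginal.headD []).getD 1 0 ≠ 0 ∧
  (listaOriginal.headD []).getD 0 0 > -1 ∧
  pvReachFail ((listaOriginal.headD []).getD 1 0)
    (PySem.List.sorted (pvDItems listaOriginal) (fun t => toLex (t.2, -t.1))) = true
instance (listaOriginal : List (List Int)) : Decidable (D_gulosoMenorPeso listaOriginal) := by
  unfold D_gulosoMenorPeso; infer_instance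

def Spec_gulosoMenorPeso (listaOriginal : List (List Int)) (out : List (List Int) × Int) : Prop :=
  ¬ D_gulosoMenorPeso listaOriginal → out = gulosoMenorPeso_alt listaOriginal
instance (listaOriginal : List (List Int)) (out : List (List Int) × Int) : Decidable (Spec_gulosoMenorPeso listaOriginal out) := by
  unfold Spec_gulosoMenorPeso; infer_instance

def pvDiffWitness_gulosoMenorPeso : List (List Int) := [[1, 1001], [5, 1001]]
def pvDiffWitnessOut_gulosoMenorPeso : (List (List Int) × Int) × (List (List Int) × Int) :=
  (([], 0), ([[5, 1001, 1]], 5))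

-- ===== CLAIM (what is proved, stated in full; the proofs are below) =====
def Claim_unchanged_gulosoMenorPeso : Prop := ∀ (listaOriginal : List (List Int)), Dom_gulosoMenorPeso listaOriginal → Pre_gulosoMenorPeso listaOriginal → Spec_gulosoMenorPeso listaOriginal (gulosoMenorPeso listaOriginal)
def Claim_changed_gulosoMenorPeso : Prop := Dom_gulosoMenorPeso (pvDiffWitness_gulosoMenorPeso) ∧ Pre_gulosoMenorPeso (pvDiffWitness_gulosoMenorPeso) ∧ D_gulosoMenorPeso (pvDiffWitness_gulosoMenorPeso) ∧ gulosoMenorPeso (pvDiffWitness_gulosoMenorPeso) = pvDiffWitnessOut_gulosoMenorPeso.1 ∧ gulosoMenorPeso_alt (pvDiffWitness_gulosoMenorPeso) = pvDiffWitnessOut_gulosoMenorPeso.2 ∧ pvDiffWitnessOut_gulosoMenorPeso.1 ≠ pvDiffWitnessOut_gulosoMenorPeso.2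
def Claim_exact_gulosoMenorPeso : Prop := ∀ (listaOriginal : List (List Int)), Dom_gulosoMenorPeso listaOriginal → Pre_gulosoMenorPeso listaOriginal → D_gulosoMenorPeso listaOriginal → gulosoMenorPeso listaOriginal ≠ gulosoMenorPeso_alt listaOriginal

-- ===== LEMMAS AND PROOFS =====

-- abstract view of A's aux list: the sentinel is (1001, 1001, 1001), a real candidate
-- is (current index i, benefit, weight); pvRender turns it back into A's aux list
def pvRender (t : Int × Int × Int) : List Int := [t.2.1, t.2.2, t.1]
def pvSent : Int × Int × Int := (1001, 1001, 1001)
-- A's replacement test: item t strictly beats candidate c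
def pvBetter (t c : Int × Int × Int) : Bool :=
  decide (t.2.2 < c.2.2) || (decide (t.2.2 = c.2.2) && decide (c.2.1 < t.2.1))
-- Bool form of the sentinel-collision test used in the proofs
def pvFail (b p : Int) : Bool := decide (1001 < p) || (decide (p = 1001) && decide (b ≤ 1001))
-- one abstract step of A's inner scan
def pvStep (cap : Int) (c t : Int × Int × Int) : Int × Int × Int :=
  if decide (t.2.2 ≤ cap) && pvBetter t c then t else c
-- items of the current lista re-annotated with their current index q+1
def pvReIdx (R : List (Int × Int × Int)) : List (Int × Int × Int) :=
  (PySem.List.enumerate R 1).map (fun t => (t.1, t.2.2.1, t.2.2.2))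

lemma pvAuxStep_render (lista : List (List Int)) (cap : Int) (c : Int × Int × Int) (j : Int) :
    pvAuxStep lista cap (pvRender c) j
      = pvRender (pvStep cap c (j, PySem.List.pyGetD (PySem.List.pyGetD lista j []) 0 0,
          PySem.List.pyGetD (PySem.List.pyGetD lista j []) 1 0)) := by
  simp only [pvAuxStep, pvStep, pvBetter]
  set a := PySem.List.pyGetD (PySem.List.pyGetD lista j []) 0 0 with ha
  set b := PySem.List.pyGetD (PySem.List.pyGetD lista j []) 1 0 with hb
  have h1 : PySem.List.pyGetD (pvRender c) 1 0 = c.2.2 := rfl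
  have h0 : PySem.List.pyGetD (pvRender c) 0 0 = c.2.1 := rfl
  rw [h1, h0]
  by_cases hfit : b ≤ cap
  · by_cases hlt : b < c.2.2
    · rw [if_pos ⟨hfit, hlt⟩]; simp [hfit, hlt, pvRender]
    · by_cases heq : b = c.2.2
      · rw [if_neg (by tauto), if_pos ⟨hfit, heq⟩]
        have hfit' : c.2.2 ≤ cap := heq ▸ hfit
        by_cases hgt : c.2.1 < a
        · rw [if_pos hgt]; simp [hfit', heq, hgt, pvRender]
        · rw [if_neg hgt]; simp [hfit', heq, hgt, pvRender]
      · rw [if_neg (by tauto), if_neg (by tauto)]; simp [hlt, heq, pvRender]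
  · rw [if_neg (by intro h; exact hfit h.1), if_neg (by intro h; exact hfit h.1)]
    simp [hfit, pvRender]

lemma pv_foldl_render (lista : List (List Int)) (cap : Int) (J : List Int) :
    ∀ c, J.foldl (pvAuxStep lista cap) (pvRender c)
      = pvRender (J.foldl (fun c j => pvStep cap c (j, PySem.List.pyGetD (PySem.List.pyGetD lista j []) 0 0,
          PySem.List.pyGetD (PySem.List.pyGetD lista j []) 1 0)) c) := by
  induction J with
  | nil => intro c; rfl
  | cons j J ih => intro c; rw [List.foldl_cons, List.foldl_cons, pvAuxStep_render]; exact ih _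

lemma pvAuxScan_eq (lista : List (List Int)) (cap : Int) :
    pvAuxScan lista cap = pvRender ((pvItems lista).foldl (pvStep cap) pvSent) := by
  unfold pvAuxScan pvItems
  rw [List.foldl_map, ← PySem.List.foldl_if_eq_foldl_filter, PySem.List.enumerate_eq_map_pyRange lista [],
    List.foldl_map]
  have hlen : PySem.List.len lista = (lista.length : Int) := rfl
  rw [hlen]
  by_cases h0 : 0 < lista.length
  · have hsplit : PySem.List.pyRange 0 (lista.length : Int) = 0 :: PySem.List.pyRange 1 (lista.length : Int) := by
      have := PySem.List.pyRange_one_cons (a := 0) (b := (lista.length : Int)) (by exact_mod_cast h0)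
      simpa using this
    rw [hsplit, List.foldl_cons]
    simp only
    rw [show (decide (1 ≤ (0:Int))) = false from rfl]
    simp only [Bool.false_eq_true, if_false]
    have hcongr : (PySem.List.pyRange 1 (lista.length : Int)).foldl
        (fun x y => if decide (1 ≤ y) = true then pvStep cap x (y, PySem.List.pyGetD (PySem.List.pyGetD lista y []) 0 0, PySem.List.pyGetD (PySem.List.pyGetD lista y []) 1 0) else x) pvSent
      = (PySem.List.pyRange 1 (lista.length : Int)).foldl
        (fun x y => pvStep cap x (y, PySem.List.pyGetD (PySem.List.pyGetD lista y []) 0 0, PySem.List.pyGetD (PySem.List.pyGetD lista y []) 1 0)) pvSent := by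
      apply PySem.List.foldl_congr_mem
      intro acc x hx
      have h1x := (PySem.List.mem_pyRange_one.mp hx).1
      simp [h1x]
    rw [hcongr, show ([1001,1001,1001] : List Int) = pvRender pvSent from rfl, pv_foldl_render]
  · have hnil : lista.length = 0 := by omega
    rw [show PySem.List.pyRange 1 (lista.length : Int) = [] by rw [hnil]; rfl,
        show PySem.List.pyRange 0 (lista.length : Int) = [] by rw [hnil]; rfl]
    rfl

lemma pvKey_lt (a b : Int × Int × Int) : pvKey a < pvKey b ↔
    (a.2.2 < b.2.2 ∨ (a.2.2 = b.2.2 ∧ (b.2.1 < a.2.1 ∨ (a.2.1 = b.2.1 ∧ a.1 < b.1)))) := by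
  unfold pvKey
  rw [Prod.Lex.toLex_lt_toLex]
  simp only [Prod.Lex.toLex_lt_toLex]
  constructor
  · rintro (h | ⟨h1, h2 | ⟨h2, h3⟩⟩)
    · exact Or.inl h
    · exact Or.inr ⟨h1, Or.inl (by omega)⟩
    · exact Or.inr ⟨h1, Or.inr ⟨by omega, h3⟩⟩
  · rintro (h | ⟨h1, h2 | ⟨h2, h3⟩⟩)
    · exact Or.inl h
    · exact Or.inr ⟨h1, Or.inl (by omega)⟩
    · exact Or.inr ⟨h1, Or.inr ⟨by omega, h3⟩⟩

lemma pvKey_inj {a b : Int × Int × Int} (h : pvKey a = pvKey b) : a = b := by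
  unfold pvKey at h
  have h' := toLex_inj.mp h
  have h1 : a.2.2 = b.2.2 := congrArg Prod.fst h'
  have h2 := toLex_inj.mp (congrArg Prod.snd h')
  have h3 : -a.2.1 = -b.2.1 := congrArg Prod.fst h2
  have h4 : a.1 = b.1 := congrArg Prod.snd h2
  exact Prod.ext h4 (Prod.ext (by omega) h1)

lemma pvReIdx_length (R : List (Int × Int × Int)) : (pvReIdx R).length = R.length := by
  simp [pvReIdx, PySem.List.length_enumerate]

lemma pvReIdx_getElem (R : List (Int × Int × Int)) (q : Nat) (hq : q < R.length) :
    (pvReIdx R)[q]'(by rw [pvReIdx_length]; exact hq)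
      = (1 + (q : Int), R[q].2.1, R[q].2.2) := by
  simp [pvReIdx, PySem.List.getElem_enumerate]

lemma pv_cur (hdr : List Int) (rows : List (List Int)) (R : List (Int × Int × Int))
    (hmap : rows.map (fun r => (PySem.List.pyGetD r 0 0, PySem.List.pyGetD r 1 0))
          = R.map (fun t => (t.2.1, t.2.2))) :
    pvItems (hdr :: rows) = pvReIdx R := by
  have hlen : rows.length = R.length := by
    have := congrArg List.length hmap; simpa using this
  unfold pvItems pvReIdx
  have hcons : PySem.List.enumerate (hdr :: rows) 0 = (0, hdr) :: PySem.List.enumerate rows 1 := by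
    simp [PySem.List.enumerate]
  rw [hcons, List.filter_cons_of_neg (by simp)]
  have hall : (PySem.List.enumerate rows 1).filter (fun t => decide (1 ≤ t.1)) = PySem.List.enumerate rows 1 := by
    apply List.filter_eq_self.mpr
    intro t ht
    obtain ⟨k, hk, rfl⟩ := (PySem.List.mem_enumerate_iff _ _ _).mp ht
    simp
  rw [hall]
  apply List.ext_getElem
  · simp [PySem.List.length_enumerate, hlen]
  · intro q h1 h2
    have hqrows : q < rows.length := by simpa [PySem.List.length_enumerate] using h1
    have hqR : q < R.length := by rwa [hlen] at hqrows
    simp only [List.getElem_map, PySem.List.getElem_enumerate]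
    have hq := congrArg (fun l => l[q]?) hmap
    simp only [List.getElem?_map] at hq
    rw [List.getElem?_eq_getElem hqrows, List.getElem?_eq_getElem hqR] at hq
    simp only [Option.map_some] at hq
    have e0 : PySem.List.pyGetD rows[q] 0 0 = R[q].2.1 := congrArg Prod.fst (Option.some.inj hq)
    have e1 : PySem.List.pyGetD rows[q] 1 0 = R[q].2.2 := congrArg Prod.snd (Option.some.inj hq)
    simp [e0, e1]

lemma pv_fold_mem (cap : Int) (L : List (Int × Int × Int)) :
    ∀ c, L.foldl (pvStep cap) c = c ∨ L.foldl (pvStep cap) c ∈ L := by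
  induction L with
  | nil => intro c; left; rfl
  | cons t L ih =>
    intro c
    rw [List.foldl_cons]
    rcases ih (pvStep cap c t) with h | h
    · rw [h]; unfold pvStep; split
      · right; exact List.mem_cons_self
      · left; rfl
    · right; exact List.mem_cons_of_mem _ h

lemma pv_fold_keep (cap : Int) (L : List (Int × Int × Int)) (c : Int × Int × Int)
    (h : ∀ t ∈ L, pvStep cap c t = c) : L.foldl (pvStep cap) c = c := by
  induction L with
  | nil => rfl
  | cons t L ih =>
    rw [List.foldl_cons, h t List.mem_cons_self]
    exact ih (fun u hu => h u (List.mem_cons_of_mem _ hu))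

lemma pv_fold_sel (cap : Int) (L1 L2 : List (Int × Int × Int)) (h : Int × Int × Int)
    (hfit : h.2.2 ≤ cap) (hs : pvBetter h pvSent = true)
    (h1 : ∀ t ∈ L1, pvBetter h t = true) (h2 : ∀ t ∈ L2, pvBetter t h = false) :
    (L1 ++ h :: L2).foldl (pvStep cap) pvSent = h := by
  rw [List.foldl_append, List.foldl_cons]
  set c1 := L1.foldl (pvStep cap) pvSent with hc1
  have hb : pvBetter h c1 = true := by
    rcases pv_fold_mem cap L1 pvSent with hc | hc
    · rw [hc1, hc]; exact hs
    · exact h1 _ (hc1 ▸ hc)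
  have hstep : pvStep cap c1 h = h := by
    unfold pvStep; simp [hfit, hb]
  rw [hstep]
  exact pv_fold_keep cap L2 h (fun t ht => by unfold pvStep; simp [h2 t ht])

lemma pv_sweep_len (L : List (Int × Int × Int)) :
    ∀ cap ben taken res, res.length ≤ (pvSweep L cap ben taken res).1.length := by
  induction L with
  | nil => intro cap ben taken res; exact le_refl _
  | cons t L ih =>
    intro cap ben taken res
    obtain ⟨j, b, p⟩ := t
    rw [pvSweep]
    split
    · exact le_refl _
    · exact le_trans (by simp) (ih (cap - p) (ben + b) (taken ++ [j]) (res ++ [[b, p, j - taken.foldl (fun acc t => if t < j then acc + 1 else acc) 0]]))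

lemma pvItems_cons (hdr : List Int) (tl : List (List Int)) :
    pvItems (hdr :: tl) = (PySem.List.enumerate tl 1).map
      (fun t => (t.1, PySem.List.pyGetD t.2 0 0, PySem.List.pyGetD t.2 1 0)) := by
  unfold pvItems
  have hcons : PySem.List.enumerate (hdr :: tl) 0 = (0, hdr) :: PySem.List.enumerate tl 1 := by
    simp [PySem.List.enumerate]
  rw [hcons, List.filter_cons_of_neg (by simp)]
  congr 1
  apply List.filter_eq_self.mpr
  intro t ht
  obtain ⟨k, hk, rfl⟩ := (PySem.List.mem_enumerate_iff _ _ _).mp ht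
  simp

def pvProj (t : Int × Int × Int) : Int × Int := (t.2.1, t.2.2)
def pvKeyP (u : Int × Int) : Int ×ₗ Int := toLex (u.2, -u.1)
def pvReachFailT (cap : Int) (L : List (Int × Int × Int)) : Bool :=
  pvReachFail cap (L.map pvProj)

lemma pvReachFailT_nil (cap : Int) : pvReachFailT cap [] = false := rfl

lemma pvReachFailT_cons (cap j b p : Int) (L : List (Int × Int × Int)) :
    pvReachFailT cap ((j, b, p) :: L)
      = if cap < p then false else if pvFail b p then true else pvReachFailT (cap - p) L := by
  show pvReachFail cap ((b, p) :: L.map pvProj) = _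
  rw [pvReachFail]
  by_cases hc : cap < p
  · rw [if_pos hc, if_pos hc]
  · rw [if_neg hc, if_neg hc]
    by_cases hf : pvFail b p = true
    · have h2 : 1001 < p ∨ (p = 1001 ∧ b ≤ 1001) := by simpa [pvFail] using hf
      rw [if_pos h2, if_pos hf]
    · have h2 : ¬ (1001 < p ∨ (p = 1001 ∧ b ≤ 1001)) := by
        simp [pvFail] at hf; omega
      rw [if_neg h2, if_neg (by simpa using hf)]
      rfl

lemma pv_insertBy_map (x : Int × Int × Int) :
    ∀ (acc : List (Int × Int × Int)), (∀ y ∈ acc, y.1 < x.1) →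
      (PySem.List.insertBy (fun a b => decide (pvKey a < pvKey b)) x acc).map pvProj
        = PySem.List.insertBy (fun a b => decide (pvKeyP a < pvKeyP b)) (pvProj x) (acc.map pvProj) := by
  intro acc
  induction acc with
  | nil => intro _; rfl
  | cons y ys ih =>
    intro hlt
    have hjy : y.1 < x.1 := hlt y List.mem_cons_self
    have hcmp : decide (pvKey x < pvKey y) = decide (pvKeyP (pvProj x) < pvKeyP (pvProj y)) := by
      have h1 := pvKey_lt x y
      have h2 : pvKeyP (pvProj x) < pvKeyP (pvProj y) ↔
          (x.2.2 < y.2.2 ∨ (x.2.2 = y.2.2 ∧ y.2.1 < x.2.1)) := by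
        unfold pvKeyP pvProj
        rw [Prod.Lex.toLex_lt_toLex]
        constructor
        · rintro (h | ⟨ha, hb⟩)
          · exact Or.inl h
          · exact Or.inr ⟨ha, by omega⟩
        · rintro (h | ⟨ha, hb⟩)
          · exact Or.inl h
          · exact Or.inr ⟨ha, by omega⟩
      rcases Decidable.em (pvKey x < pvKey y) with h | h
      · have := h1.mp h
        rcases this with hcase | ⟨he, hcase⟩
        · simp [h, h2.mpr (Or.inl hcase)]
        · rcases hcase with hb2 | ⟨hb2, hj⟩
          · simp [h, h2.mpr (Or.inr ⟨he, hb2⟩)]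
          · omega
      · have hnot : ¬ pvKeyP (pvProj x) < pvKeyP (pvProj y) := by
          intro hp
          apply h
          rcases h2.mp hp with hcase | ⟨he, hb2⟩
          · exact h1.mpr (Or.inl hcase)
          · exact h1.mpr (Or.inr ⟨he, Or.inl hb2⟩)
        simp [h, hnot]
    rw [PySem.List.insertBy]
    rw [List.map_cons, PySem.List.insertBy]
    rw [← hcmp]
    by_cases hb : decide (pvKey x < pvKey y) = true
    · rw [if_pos hb, if_pos hb]
      rfl
    · rw [if_neg hb, if_neg hb]
      rw [List.map_cons, ih (fun u hu => hlt u (List.mem_cons_of_mem _ hu))]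

lemma pv_sorted_map (xs : List (Int × Int × Int)) (hasc : xs.Pairwise (fun a b => a.1 < b.1)) :
    PySem.List.sorted (xs.map pvProj) pvKeyP = (PySem.List.sorted xs pvKey).map pvProj := by
  rw [PySem.List.sorted_eq_foldl_insertBy, PySem.List.sorted_eq_foldl_insertBy, List.foldl_map]
  suffices h : ∀ (ys : List (Int × Int × Int)) (acc : List (Int × Int × Int)),
      (∀ y ∈ acc, ∀ x ∈ ys, y.1 < x.1) → ys.Pairwise (fun a b => a.1 < b.1) →
      ys.foldl (fun a x => PySem.List.insertBy (fun a b => decide (pvKeyP a < pvKeyP b)) (pvProj x) a) (acc.map pvProj)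
        = (ys.foldl (fun a x => PySem.List.insertBy (fun a b => decide (pvKey a < pvKey b)) x a) acc).map pvProj by
    exact h xs [] (by simp) hasc
  intro ys
  induction ys with
  | nil => intro acc _ _; rfl
  | cons x ys ih =>
    intro acc hacc hpw
    rw [List.foldl_cons, List.foldl_cons]
    rw [← pv_insertBy_map x acc (fun y hy => hacc y hy x List.mem_cons_self)]
    apply ih
    · intro y hy z hz
      rcases (PySem.List.mem_insertBy _ _ _ _).mp hy with rfl | hy2
      · exact (List.pairwise_cons.mp hpw).1 z hz
      · exact hacc y hy2 z (List.mem_cons_of_mem _ hz)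
    · exact (List.pairwise_cons.mp hpw).2

lemma pv_items_asc (l : List (List Int)) : (pvItems l).Pairwise (fun a b => a.1 < b.1) := by
  cases l with
  | nil => simp [pvItems, PySem.List.enumerate]
  | cons hdr tl =>
    rw [pvItems_cons]
    exact (PySem.List.pairwise_lt_enumerate tl 1).map _ (fun {a b} h => h)

lemma pvDItems_eq (l : List (List Int)) : pvDItems l = (pvItems l).map pvProj := by
  cases l with
  | nil => rfl
  | cons hdr tl =>
    rw [pvItems_cons, List.map_map]
    unfold pvDItems
    simp only [List.tail_cons]
    conv_lhs => rw [← PySem.List.map_snd_enumerate tl 1, List.map_map]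
    apply List.map_congr_left
    intro t _
    simp [Function.comp, pvProj, PySem.List.pyGetD_ofNat']

lemma pvD_bridge (l : List (List Int)) (cap : Int) :
    pvReachFail cap (PySem.List.sorted (pvDItems l) (fun t => toLex (t.2, -t.1)))
      = pvReachFailT cap (PySem.List.sorted (pvItems l) pvKey) := by
  have hk : (fun t : Int × Int => toLex (t.2, -t.1)) = pvKeyP := rfl
  rw [hk, pvDItems_eq, pv_sorted_map (pvItems l) (pv_items_asc l)]
  rfl

lemma pv_main (w qtd : Int) (hw : w ≠ 0) (hq : qtd > -1) :
    ∀ (Rs R : List (Int × Int × Int)) (rows : List (List Int)) (hdr : List Int) (fuel : Nat)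
      (cap ben : Int) (taken : List Int) (res : List (List Int)),
      rows.map (fun r => (PySem.List.pyGetD r 0 0, PySem.List.pyGetD r 1 0)) = R.map (fun t => (t.2.1, t.2.2)) →
      R.Pairwise (fun a b => a.1 < b.1) →
      Rs.Perm R →
      Rs.Pairwise (fun a b => pvKey a < pvKey b) →
      (∀ (q : Nat) (hqlt : q < R.length), R[q].1 - (taken.countP (fun t => decide (t < R[q].1)) : Int) = (q : Int) + 1) →
      R.length + 1 ≤ fuel →
      ((pvReachFailT cap Rs = false → pvLoopA w qtd fuel (hdr :: rows) cap ben res = pvSweep Rs cap ben taken res) ∧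
       (pvReachFailT cap Rs = true → (pvLoopA w qtd fuel (hdr :: rows) cap ben res).1.length < (pvSweep Rs cap ben taken res).1.length)) := by
  intro Rs
  induction Rs with
  | nil =>
    intro R rows hdr fuel cap ben taken res hmap hasc hperm hsorted hidx hfuel
    have hR : R = [] := List.Perm.eq_nil hperm.symm
    subst hR
    have hrows : rows = [] := by
      have h := congrArg List.length hmap; simp at h; exact h
    subst hrows
    obtain ⟨f, rfl⟩ : ∃ f, fuel = f + 1 := ⟨fuel - 1, by omega⟩
    constructor
    · intro _
      rw [pvLoopA, if_pos ⟨hw, hq⟩]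
      have haux : pvAuxScan [hdr] cap = [1001, 1001, 1001] := by
        rw [pvAuxScan_eq]
        rw [pv_cur hdr [] [] (by simp)]
        rfl
      simp only [haux]
      rw [if_neg (by simp)]
      rfl
    · intro habs; rw [pvReachFailT_nil] at habs; exact absurd habs (by simp)
  | cons h Rs' ih =>
    intro R rows hdr fuel cap ben taken res hmap hasc hperm hsorted hidx hfuel
    obtain ⟨jh, bh, ph⟩ := h
    obtain ⟨f, rfl⟩ : ∃ f, fuel = f + 1 := ⟨fuel - 1, by omega⟩
    have hlenrows : rows.length = R.length := by
      have := congrArg List.length hmap; simpa using this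
    have hcur : pvItems (hdr :: rows) = pvReIdx R := pv_cur hdr rows R hmap
    have hmemR : (jh, bh, ph) ∈ R := hperm.mem_iff.mp List.mem_cons_self
    obtain ⟨qs, hqs, hRqs⟩ := List.mem_iff_getElem.mp hmemR
    have hkeymin : ∀ t ∈ R, t = (jh, bh, ph) ∨ pvKey (jh, bh, ph) < pvKey t := by
      intro t ht
      rcases List.mem_cons.mp (hperm.symm.mem_iff.mp ht) with h1 | h1
      · exact Or.inl h1
      · exact Or.inr ((List.pairwise_cons.mp hsorted).1 t h1)
    have hkq : ∀ (q : Nat) (hql : q < R.length), q ≠ qs → pvKey (jh, bh, ph) < pvKey R[q] := by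
      intro q hql hne
      rcases hkeymin R[q] (List.getElem_mem hql) with h1 | h1
      · exfalso
        rcases Nat.lt_or_ge q qs with hlt | hge
        · have := (List.pairwise_iff_getElem.mp hasc) q qs hql hqs hlt
          rw [h1, hRqs] at this; exact absurd this (by simp)
        · have hgt : qs < q := by omega
          have := (List.pairwise_iff_getElem.mp hasc) qs q hqs hql hgt
          rw [h1, hRqs] at this; exact absurd this (by simp)
      · exact h1
    have hple : ∀ t ∈ R, ph ≤ t.2.2 := by
      intro t ht
      rcases hkeymin t ht with h1 | h1
      · rw [h1]
      · rcases (pvKey_lt _ _).mp h1 with h2 | ⟨h2, _⟩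
        · exact le_of_lt h2
        · exact le_of_eq h2
    -- A's guard and aux
    rw [pvLoopA, if_pos ⟨hw, hq⟩]
    simp only [pvAuxScan_eq, hcur]
    by_cases hfit : ph ≤ cap
    · -- head fits
      have hreach : pvReachFailT cap ((jh, bh, ph) :: Rs') = (if pvFail bh ph then true else pvReachFailT (cap - ph) Rs') := by
        rw [pvReachFailT_cons, if_neg (by omega)]
      by_cases hfail : pvFail bh ph = true
      · -- A stops, B keeps going: the 'changed' half
        have hfail2 : 1001 < ph ∨ (ph = 1001 ∧ bh ≤ 1001) := by
          simpa [pvFail] using hfail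
        have hstop : (pvReIdx R).foldl (pvStep cap) pvSent = pvSent := by
          apply pv_fold_keep
          intro t ht
          obtain ⟨q, hql', rfl⟩ := List.mem_iff_getElem.mp ht
          have hql : q < R.length := by rwa [pvReIdx_length] at hql'
          rw [pvReIdx_getElem R q hql]
          have hp1 : ph ≤ R[q].2.2 := by simpa using hple R[q] (List.getElem_mem hql)
          have hbq : R[q].2.2 = 1001 → R[q].2.1 ≤ 1001 := by
            intro hpq
            rcases hfail2 with h1 | ⟨h1, h2⟩
            · omega
            · by_cases hqq : q = qs
              · have h5 : R[q]'hql = (jh, bh, ph) := by subst hqq; exact hRqs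
                have : R[q].2.1 = bh := by rw [h5]
                omega
              · have hkl := (pvKey_lt _ _).mp (hkq q hql hqq)
                simp at hkl
                omega
          unfold pvStep
          by_cases htf : R[q].2.2 ≤ cap
          · have hbet : pvBetter (1 + (q:Int), R[q].2.1, R[q].2.2) pvSent = false := by
              simp only [pvBetter, pvSent]
              simp
              omega
            simp [hbet]
          · simp [htf]
        rw [hstop]
        rw [if_neg (by simp [pvRender, pvSent])]
        have hBstep : pvSweep ((jh, bh, ph) :: Rs') cap ben taken res
            = pvSweep Rs' (cap - ph) (ben + bh) (taken ++ [jh]) (res ++ [[bh, ph, jh - taken.foldl (fun acc t => if t < jh then acc + 1 else acc) 0]]) := by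
          rw [pvSweep, if_neg (by omega)]
        constructor
        · intro hrf
          rw [hreach, if_pos hfail] at hrf; exact absurd hrf (by simp)
        · intro _
          rw [hBstep]
          have hlen2 := pv_sweep_len Rs' (cap - ph) (ben + bh) (taken ++ [jh]) (res ++ [[bh, ph, jh - taken.foldl (fun acc t => if t < jh then acc + 1 else acc) 0]])
          simp at hlen2 ⊢
          omega
      · -- head passes the sentinel: both take it
        have hnofail : pvFail bh ph = false := by
          rw [Bool.not_eq_true] at hfail; exact hfail
        have hpass2 : ph < 1001 ∨ (ph = 1001 ∧ 1001 < bh) := by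
          simp [pvFail] at hnofail; omega
        have hreach2 : pvReachFailT cap ((jh, bh, ph) :: Rs') = pvReachFailT (cap - ph) Rs' := by
          rw [hreach, hnofail]; simp
        have hqsI : qs < (pvReIdx R).length := by rw [pvReIdx_length]; exact hqs
        have hgetsel : (pvReIdx R)[qs]'hqsI = (1 + (qs:Int), bh, ph) := by
          rw [pvReIdx_getElem R qs hqs, hRqs]
        have hsplit : pvReIdx R = (pvReIdx R).take qs ++ (1 + (qs:Int), bh, ph) :: (pvReIdx R).drop (qs+1) := by
          have h6 := List.getElem_cons_drop hqsI
          rw [hgetsel] at h6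
          rw [h6, List.take_append_drop]
        have htake : ∀ t ∈ (pvReIdx R).take qs, pvBetter (1 + (qs:Int), bh, ph) t = true := by
          intro t ht
          obtain ⟨i, hi, hti⟩ := List.mem_iff_getElem.mp ht
          have hiq : i < qs := by
            have := hi; simp [List.length_take] at this; omega
          have hiR : i < R.length := by omega
          have hti2 : t = (1 + (i:Int), R[i].2.1, R[i].2.2) := by
            rw [← hti, List.getElem_take, pvReIdx_getElem R i hiR]
          have hkl := (pvKey_lt _ _).mp (hkq i hiR (by omega))
          have horder : R[i].1 < R[qs].1 := (List.pairwise_iff_getElem.mp hasc) i qs hiR hqs hiq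
          have hjq : R[i].1 < jh := by
            have : R[qs].1 = jh := by rw [hRqs]
            omega
          simp at hkl
          rw [hti2]
          simp [pvBetter]
          omega
        have hdrop : ∀ t ∈ (pvReIdx R).drop (qs+1), pvBetter t (1 + (qs:Int), bh, ph) = false := by
          intro t ht
          obtain ⟨i, hi, hti⟩ := List.mem_iff_getElem.mp ht
          have hiR : qs + 1 + i < R.length := by
            have := hi; simp [List.length_drop, pvReIdx_length] at this; omega
          have hti2 : t = (1 + ((qs+1+i : Nat):Int), R[qs+1+i].2.1, R[qs+1+i].2.2) := by
            rw [← hti, List.getElem_drop, pvReIdx_getElem R (qs+1+i) hiR]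
          have hkl := (pvKey_lt _ _).mp (hkq (qs+1+i) hiR (by omega))
          have horder : R[qs].1 < R[qs+1+i].1 := (List.pairwise_iff_getElem.mp hasc) qs (qs+1+i) hqs hiR (by omega)
          have hjq : jh < R[qs+1+i].1 := by
            have : R[qs].1 = jh := by rw [hRqs]
            omega
          simp at hkl
          rw [hti2]
          simp [pvBetter]
          omega
        have hfold : (pvReIdx R).foldl (pvStep cap) pvSent = (1 + (qs:Int), bh, ph) := by
          conv_lhs => rw [hsplit]
          exact pv_fold_sel cap _ _ _ (by simpa using hfit)
            (by simp [pvBetter, pvSent]; omega) htake hdrop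
        rw [hfold]
        rw [if_pos (by simp [pvRender]; omega)]
        have e2 : PySem.List.pyGetD (pvRender (1 + (qs:Int), bh, ph)) 2 0 = 1 + (qs:Int) := rfl
        have e1 : PySem.List.pyGetD (pvRender (1 + (qs:Int), bh, ph)) 1 0 = ph := rfl
        have e0 : PySem.List.pyGetD (pvRender (1 + (qs:Int), bh, ph)) 0 0 = bh := rfl
        rw [e2, e1, e0]
        have e3 : (1 + (qs:Int)).toNat = qs + 1 := by omega
        rw [e3, List.eraseIdx_cons_succ]
        have e4 : pvRender (1 + (qs:Int), bh, ph) = [bh, ph, 1 + (qs:Int)] := rfl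
        rw [e4]
        -- B's step
        have hdyn : jh - taken.foldl (fun acc t => if t < jh then acc + 1 else acc) 0 = 1 + (qs:Int) := by
          rw [PySem.List.foldl_ite_add_one (fun t => t < jh) taken 0]
          have h7 := hidx qs hqs
          have h8 : R[qs].1 = jh := by rw [hRqs]
          rw [h8] at h7
          omega
        have hBstep : pvSweep ((jh, bh, ph) :: Rs') cap ben taken res
            = pvSweep Rs' (cap - ph) (ben + bh) (taken ++ [jh]) (res ++ [[bh, ph, 1 + (qs:Int)]]) := by
          rw [pvSweep, if_neg (by omega)]
          rw [hdyn]
        rw [hBstep]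
        -- invariants for the recursive call
        have hmap' : (rows.eraseIdx qs).map (fun r => (PySem.List.pyGetD r 0 0, PySem.List.pyGetD r 1 0))
            = (R.eraseIdx qs).map (fun t => (t.2.1, t.2.2)) := by
          rw [← List.eraseIdx_map, ← List.eraseIdx_map, hmap]
        have hasc' : (R.eraseIdx qs).Pairwise (fun a b => a.1 < b.1) :=
          List.Pairwise.eraseIdx qs hasc
        have hperm' : Rs'.Perm (R.eraseIdx qs) := by
          have h1 : R.take qs ++ (jh, bh, ph) :: R.drop (qs+1) = R := by
            have h6 := List.getElem_cons_drop hqs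
            rw [hRqs] at h6
            rw [h6, List.take_append_drop]
          have h2 : R.eraseIdx qs = R.take qs ++ R.drop (qs+1) := List.eraseIdx_eq_take_drop_succ R qs
          have h3 : ((jh, bh, ph) :: Rs').Perm (R.take qs ++ (jh, bh, ph) :: R.drop (qs+1)) := by
            rw [h1]; exact hperm
          have h5 : ((jh, bh, ph) :: Rs').Perm ((jh, bh, ph) :: (R.take qs ++ R.drop (qs+1))) :=
            h3.trans List.perm_middle
          rw [h2]
          exact h5.cons_inv
        have hsorted' : Rs'.Pairwise (fun a b => pvKey a < pvKey b) := (List.pairwise_cons.mp hsorted).2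
        have hlen3 : (R.eraseIdx qs).length = R.length - 1 := by
          rw [List.length_eraseIdx]; simp [hqs]
        have hidx' : ∀ (q : Nat) (hql : q < (R.eraseIdx qs).length),
            (R.eraseIdx qs)[q].1 - ((taken ++ [jh]).countP (fun t => decide (t < (R.eraseIdx qs)[q].1)) : Int) = (q : Int) + 1 := by
          intro q hql
          by_cases hlt : q < qs
          · rw [List.getElem_eraseIdx_of_lt hql hlt]
            have hqR : q < R.length := by omega
            have horder : R[q].1 < R[qs].1 := (List.pairwise_iff_getElem.mp hasc) q qs hqR hqs hlt
            have h8 : R[qs].1 = jh := by rw [hRqs]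
            rw [List.countP_append]
            have h9 : List.countP (fun t => decide (t < R[q].1)) [jh] = 0 := by
              simp; omega
            rw [h9]
            have := hidx q hqR
            omega
          · have hge : qs ≤ q := by omega
            rw [List.getElem_eraseIdx_of_ge hql hge]
            have hq1 : q + 1 < R.length := by omega
            have horder : R[qs].1 < R[q+1].1 := (List.pairwise_iff_getElem.mp hasc) qs (q+1) hqs hq1 (by omega)
            have h8 : R[qs].1 = jh := by rw [hRqs]
            rw [List.countP_append]
            have h9 : List.countP (fun t => decide (t < R[q+1].1)) [jh] = 1 := by
              simp; omega
            rw [h9]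
            have := hidx (q+1) hq1
            push_cast at this ⊢
            omega
        have hfuel' : (R.eraseIdx qs).length + 1 ≤ f := by
          rw [hlen3]
          have : 0 < R.length := by omega
          omega
        have IH := ih (R.eraseIdx qs) (rows.eraseIdx qs) hdr f (cap - ph) (ben + bh)
          (taken ++ [jh]) (res ++ [[bh, ph, 1 + (qs:Int)]]) hmap' hasc' hperm' hsorted' hidx' hfuel'
        constructor
        · intro hrf
          rw [hreach2] at hrf
          exact IH.1 hrf
        · intro hrf
          rw [hreach2] at hrf
          exact IH.2 hrf
    · -- nothing fits: both stop
      have hreach : pvReachFailT cap ((jh, bh, ph) :: Rs') = false := by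
        rw [pvReachFailT_cons, if_pos (by omega)]
      have hstop : (pvReIdx R).foldl (pvStep cap) pvSent = pvSent := by
        apply pv_fold_keep
        intro t ht
        obtain ⟨q, hql', rfl⟩ := List.mem_iff_getElem.mp ht
        have hql : q < R.length := by rwa [pvReIdx_length] at hql'
        rw [pvReIdx_getElem R q hql]
        unfold pvStep
        have : ¬ R[q].2.2 ≤ cap := by
          have := hple R[q] (List.getElem_mem hql); omega
        simp [this]
      rw [hstop, if_neg (by simp [pvRender, pvSent])]
      constructor
      · intro _
        rw [pvSweep, if_pos (by omega)]
      · intro habs; rw [hreach] at habs; exact absurd habs (by simp)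

lemma pv_top (hdr : List Int) (tl : List (List Int))
    (hw : PySem.List.pyGetD (PySem.List.pyGetD (hdr :: tl) 0 []) 1 0 ≠ 0)
    (hq : PySem.List.pyGetD (PySem.List.pyGetD (hdr :: tl) 0 []) 0 0 > -1) :
    ((pvReachFailT (PySem.List.pyGetD hdr 1 0) (PySem.List.sorted (pvItems (hdr :: tl)) pvKey) = false →
        gulosoMenorPeso (hdr :: tl) = pvSweep (PySem.List.sorted (pvItems (hdr :: tl)) pvKey) (PySem.List.pyGetD hdr 1 0) 0 [] []) ∧
     (pvReachFailT (PySem.List.pyGetD hdr 1 0) (PySem.List.sorted (pvItems (hdr :: tl)) pvKey) = true →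
        (gulosoMenorPeso (hdr :: tl)).1.length < (pvSweep (PySem.List.sorted (pvItems (hdr :: tl)) pvKey) (PySem.List.pyGetD hdr 1 0) 0 [] []).1.length)) := by
  have hget0 : PySem.List.pyGetD (hdr :: tl) 0 [] = hdr := by simp [PySem.List.pyGetD_ofNat']
  rw [hget0] at hw hq
  have hitems := pvItems_cons hdr tl
  have hlenI : (pvItems (hdr :: tl)).length = tl.length := by
    rw [hitems]; simp [PySem.List.length_enumerate]
  have hmap0 : tl.map (fun r => (PySem.List.pyGetD r 0 0, PySem.List.pyGetD r 1 0))
      = (pvItems (hdr :: tl)).map (fun t => (t.2.1, t.2.2)) := by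
    rw [hitems, List.map_map]
    conv_lhs => rw [← PySem.List.map_snd_enumerate tl 1, List.map_map]
    rfl
  have hasc0 : (pvItems (hdr :: tl)).Pairwise (fun a b => a.1 < b.1) := by
    rw [hitems]
    exact (PySem.List.pairwise_lt_enumerate tl 1).map _ (fun {a b} h => h)
  have hperm0 : (PySem.List.sorted (pvItems (hdr :: tl)) pvKey).Perm (pvItems (hdr :: tl)) :=
    PySem.List.sorted_perm _ _ _
  have hnd : (PySem.List.sorted (pvItems (hdr :: tl)) pvKey).Nodup := by
    rw [List.Perm.nodup_iff hperm0]
    exact List.Pairwise.imp (fun {a b} h he => by rw [he] at h; exact lt_irrefl _ h) hasc0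
  have hsorted0 : (PySem.List.sorted (pvItems (hdr :: tl)) pvKey).Pairwise (fun a b => pvKey a < pvKey b) := by
    have hle := PySem.List.sorted_pairwise (pvItems (hdr :: tl)) pvKey
    exact List.Pairwise.imp (fun {a b} hab => lt_of_le_of_ne hab.1 (fun hk => hab.2 (pvKey_inj hk)))
      (List.Pairwise.and hle hnd)
  have hidx0 : ∀ (q : Nat) (hql : q < (pvItems (hdr :: tl)).length),
      (pvItems (hdr :: tl))[q].1 - (([] : List Int).countP (fun t => decide (t < (pvItems (hdr :: tl))[q].1)) : Int) = (q : Int) + 1 := by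
    intro q hql
    have hq2 : q < tl.length := by rwa [hlenI] at hql
    have : (pvItems (hdr :: tl))[q].1 = 1 + (q : Int) := by
      simp only [hitems, List.getElem_map, PySem.List.getElem_enumerate]
    rw [this]
    simp
    omega
  have hfuel0 : (pvItems (hdr :: tl)).length + 1 ≤ tl.length + 1 + 1 := by omega
  have hmain := pv_main (PySem.List.pyGetD hdr 1 0) (PySem.List.pyGetD hdr 0 0) hw hq
    (PySem.List.sorted (pvItems (hdr :: tl)) pvKey) (pvItems (hdr :: tl)) tl hdr
    (tl.length + 1 + 1) (PySem.List.pyGetD hdr 1 0) 0 [] []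
    hmap0 hasc0 hperm0 hsorted0 hidx0 hfuel0
  have hA : gulosoMenorPeso (hdr :: tl)
      = pvLoopA (PySem.List.pyGetD hdr 1 0) (PySem.List.pyGetD hdr 0 0) (tl.length + 1 + 1) (hdr :: tl) (PySem.List.pyGetD hdr 1 0) 0 [] := by
    simp only [gulosoMenorPeso, hget0]
    rfl
  rw [hA]
  exact hmain

lemma pv_bridge (hdr : List Int) :
    PySem.List.pyGetD hdr 1 0 = hdr.getD 1 0 ∧ PySem.List.pyGetD hdr 0 0 = hdr.getD 0 0 := by
  constructor <;> simp [PySem.List.pyGetD_ofNat']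

lemma pv_unchanged_aux : ∀ l, Pre_gulosoMenorPeso l → ¬ D_gulosoMenorPeso l → gulosoMenorPeso l = gulosoMenorPeso_alt l := by
  intro l hpre hnD
  obtain ⟨hne, hhd, hrows⟩ := hpre
  cases l with
  | nil => exact absurd rfl hne
  | cons hdr tl =>
    have hget0 : PySem.List.pyGetD (hdr :: tl) 0 [] = hdr := by simp [PySem.List.pyGetD_ofNat']
    obtain ⟨hb1, hb0⟩ := pv_bridge hdr
    by_cases hguard : PySem.List.pyGetD hdr 1 0 = 0 ∨ PySem.List.pyGetD hdr 0 0 ≤ -1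
    · have hA : gulosoMenorPeso (hdr :: tl) = ([], 0) := by
        simp only [gulosoMenorPeso, hget0]
        show pvLoopA _ _ (tl.length + 1 + 1) _ _ _ _ = ([], 0)
        rw [pvLoopA, if_neg (by omega)]
      have hB : gulosoMenorPeso_alt (hdr :: tl) = ([], 0) := by
        simp only [gulosoMenorPeso_alt, hget0]
        rw [if_pos (by omega)]
      rw [hA, hB]
    · rw [not_or] at hguard
      obtain ⟨hw, hq⟩ := hguard
      rw [not_le] at hq
      have hq' : PySem.List.pyGetD hdr 0 0 > -1 := by omega
      have hreach : pvReachFailT (PySem.List.pyGetD hdr 1 0) (PySem.List.sorted (pvItems (hdr :: tl)) pvKey) = false := by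
        unfold D_gulosoMenorPeso at hnD
        simp only [List.headD_cons] at hnD
        rw [pvD_bridge] at hnD
        rw [← hb1, ← hb0] at hnD
        rcases Bool.eq_false_or_eq_true (pvReachFailT (PySem.List.pyGetD hdr 1 0) (PySem.List.sorted (pvItems (hdr :: tl)) pvKey)) with h | h
        · exact absurd ⟨hw, hq', h⟩ hnD
        · exact h
      have htop := (pv_top hdr tl (by rwa [hget0]) (by rwa [hget0])).1 hreach
      rw [htop]
      simp only [gulosoMenorPeso_alt, hget0]
      rw [if_neg (by omega)]

lemma pv_exact_aux : ∀ l, Pre_gulosoMenorPeso l → D_gulosoMenorPeso l → gulosoMenorPeso l ≠ gulosoMenorPeso_alt l := by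
  intro l hpre hD
  obtain ⟨hne, hhd, hrows⟩ := hpre
  cases l with
  | nil => exact absurd rfl hne
  | cons hdr tl =>
    have hget0 : PySem.List.pyGetD (hdr :: tl) 0 [] = hdr := by simp [PySem.List.pyGetD_ofNat']
    obtain ⟨hb1, hb0⟩ := pv_bridge hdr
    obtain ⟨hw0, hq0, hr0⟩ := hD
    simp only [List.headD_cons] at hw0 hq0 hr0
    have hw : PySem.List.pyGetD hdr 1 0 ≠ 0 := by rw [hb1]; exact hw0
    have hq : PySem.List.pyGetD hdr 0 0 > -1 := by rw [hb0]; exact hq0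
    have hreach : pvReachFailT (PySem.List.pyGetD hdr 1 0) (PySem.List.sorted (pvItems (hdr :: tl)) pvKey) = true := by
      have := hr0
      rw [pvD_bridge] at this
      rwa [← hb1] at this
    have htop := (pv_top hdr tl (by rwa [hget0]) (by rwa [hget0])).2 hreach
    intro heq
    rw [heq] at htop
    have hB : gulosoMenorPeso_alt (hdr :: tl) = pvSweep (PySem.List.sorted (pvItems (hdr :: tl)) pvKey) (PySem.List.pyGetD hdr 1 0) 0 [] [] := by
      simp only [gulosoMenorPeso_alt, hget0]
      rw [if_neg (by omega)]
    rw [hB] at htop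
    exact lt_irrefl _ htop

-- ===== VERDICT (by name: the statement is the Claim_ definition above) =====
theorem gulosoMenorPeso_spec : Claim_unchanged_gulosoMenorPeso := by
  intro listaOriginal _ hpre hnD
  exact pv_unchanged_aux listaOriginal hpre hnD
theorem gulosoMenorPeso_changed : Claim_changed_gulosoMenorPeso := by
  unfold Claim_changed_gulosoMenorPeso; decide
theorem gulosoMenorPeso_tight : Claim_exact_gulosoMenorPeso := by
  intro listaOriginal _ hpre hD
  exact pv_exact_aux listaOriginal hpre hD
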